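-- pv_equiv track=rewrite | github.com/shkasn496/practice-makes-better | array/lintcode_data_segmentation.py | segment_string
-- ===== SOURCE A (Python) =====
-- def segment_string(input_data):
--     output = []
--     if not len(input_data):return output
--     word = []
--     for c in input_data:
--         if c == ' ' or not c.isalpha():
--             if len(word) != 0:
--                 output.append("".join(word))
--                 word=[]
--             if c != ' ': output.append(c)
--         elif c.isalpha():word.append(c)
--
--     if len(word) != 0:output.append("".join(word))
--     del word
--     return output
-- ===== SOURCE B (Python) =====
-- def segment_string(input_data):
--     # run-scanning two-pointer version: emit whole alpha runs, and each
--     # non-space non-alpha char individually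
--     out = []
--     i, n = 0, len(input_data)
--     while i < n:
--         if input_data[i].isalpha():
--             j = i
--             while j < n and input_data[j].isalpha():
--                 j += 1
--             out.append(input_data[i:j])
--             i = j
--         else:
--             if input_data[i] != ' ':
--                 out.append(input_data[i])
--             i += 1
--     return out
-- ===== Notes on version B (the rewrite author's own statement) =====
-- stated objective: alternative
-- what changed: Replaces A's accumulate-and-flush character loop (a word buffer flushed at separators and at the end) with a two-pointer run scanner that slices each maximal alphabetic run out directly and emits other non-space characters one by one.
import Mathlib
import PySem

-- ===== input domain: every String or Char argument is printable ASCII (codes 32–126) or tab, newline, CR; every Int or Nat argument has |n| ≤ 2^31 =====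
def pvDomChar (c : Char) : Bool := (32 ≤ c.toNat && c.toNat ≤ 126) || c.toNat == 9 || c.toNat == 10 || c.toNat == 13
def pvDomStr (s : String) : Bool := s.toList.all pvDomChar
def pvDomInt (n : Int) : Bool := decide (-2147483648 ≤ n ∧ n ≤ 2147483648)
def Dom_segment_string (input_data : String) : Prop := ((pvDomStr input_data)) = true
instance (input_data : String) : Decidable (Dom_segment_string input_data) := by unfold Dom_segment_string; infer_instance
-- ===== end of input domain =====

-- B replaces A's accumulate-and-flush word buffer with a two-pointer run scanner (alternative decomposition, same O(n) cost).

-- ===== PORT A =====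
-- the for-loop with state (output, word); word is the list of chars of the current word
def segAgo (cs : List Char) (output : List String) (word : List Char) : List String :=
  match cs with
  | [] => if word.length ≠ 0 then output ++ [String.mk word] else output
  | c :: rest =>
    if c = ' ' ∨ ¬ PySem.Chars.isalpha c then
      let output1 := if word.length ≠ 0 then output ++ [String.mk word] else output
      let output2 := if c ≠ ' ' then output1 ++ [String.mk [c]] else output1
      segAgo rest output2 []
    else
      segAgo rest output (word ++ [c])

def segment_string (input_data : String) : List String :=
  if input_data.toList.length = 0 then [] else segAgo input_data.toList [] []

-- ===== PORT B =====
-- the while loop over index i: an alpha run is scanned ahead (takeWhile/dropWhile = the j-scan and slice);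
-- a non-alpha char is emitted alone unless it is a space
def segBgo (cs : List Char) : List String :=
  match cs with
  | [] => []
  | c :: rest =>
    if h : PySem.Chars.isalpha c then
      String.mk ((c :: rest).takeWhile PySem.Chars.isalpha)
        :: segBgo ((c :: rest).dropWhile PySem.Chars.isalpha)
    else if c ≠ ' ' then String.mk [c] :: segBgo rest
    else segBgo rest
termination_by cs.length
decreasing_by
  · simp only [List.dropWhile_cons, h, if_pos]
    exact Nat.lt_succ_of_le (List.length_dropWhile_le _ _)
  · simp
  · simp

def segment_string_alt (input_data : String) : List String := segBgo input_data.toList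

-- ===== PRECONDITION & SPEC =====
def Spec_segment_string (input_data : String) (out : List String) : Prop := out = segment_string_alt input_data
instance (input_data : String) (out : List String) : Decidable (Spec_segment_string input_data out) := by unfold Spec_segment_string; infer_instance

-- ===== CLAIM (what is proved, stated in full; the proofs are below) =====
def Claim_equal_segment_string : Prop := ∀ (input_data : String), Dom_segment_string input_data → Spec_segment_string input_data (segment_string input_data)

-- ===== LEMMAS AND PROOFS =====
lemma segAgo_eq_segBgo (cs : List Char) : ∀ (output : List String) (word : List Char),
    segAgo cs output word =
      output ++ (if word = [] then segBgo cs
        else String.mk (word ++ cs.takeWhile PySem.Chars.isalpha)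
              :: segBgo (cs.dropWhile PySem.Chars.isalpha)) := by
  induction cs with
  | nil =>
    intro output word
    by_cases hw : word = [] <;> simp [segAgo, segBgo, hw]
  | cons c rest ih =>
    intro output word
    by_cases hc : PySem.Chars.isalpha c
    · have hsp : c ≠ ' ' := by
        rintro rfl; exact absurd hc (by decide)
      have hcond : ¬ (c = ' ' ∨ ¬ PySem.Chars.isalpha c) := by
        rintro (h | h); exact hsp h; exact h hc
      rw [segAgo, if_neg hcond, ih]
      rw [segBgo]
      simp only [hc, dif_pos, List.takeWhile_cons_of_pos, List.dropWhile_cons_of_pos]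
      by_cases hw : word = [] <;> simp [hw]
    · have hcond : c = ' ' ∨ ¬ PySem.Chars.isalpha c := Or.inr hc
      rw [segAgo, if_pos hcond, ih]
      rw [segBgo]
      simp only [hc]
      have htw : (c :: rest).takeWhile PySem.Chars.isalpha = [] :=
        List.takeWhile_cons_of_neg (by simp [hc])
      have hdw : (c :: rest).dropWhile PySem.Chars.isalpha = c :: rest :=
        List.dropWhile_cons_of_neg (by simp [hc])
      by_cases hsp : c = ' '
      · subst hsp
        by_cases hw : word = [] <;> simp [hw, htw, hdw, segBgo, hc]
      · by_cases hw : word = [] <;>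
          simp [hw, htw, hdw, hsp, segBgo, hc]

-- ===== VERDICT (by name: the statement is the Claim_ definition above) =====
theorem segment_string_spec : Claim_equal_segment_string := by
  intro input_data _
  unfold Spec_segment_string segment_string segment_string_alt
  by_cases h : input_data.toList.length = 0
  · rw [if_pos h]
    rw [List.length_eq_zero_iff] at h
    rw [h, segBgo]
  · rw [if_neg h, segAgo_eq_segBgo]
    simp
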